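-- pv_equiv track=rewrite | github.com/RichardBrookfield/AOC | 2022/Day07.py | calculate_total_sizes
-- ===== SOURCE A (Python) =====
-- from typing import Dict, List
--
-- def calculate_total_sizes(folder_sizes: Dict[str, int]) -> Dict[str, int]:
--     total_sizes = {"/": 0}
--
--     for k in folder_sizes.keys():
--         total_sizes[k] = 0
--
--     for total in total_sizes.keys():
--         total_sizes[total] = sum(
--             v for k, v in folder_sizes.items() if total == k[0 : len(total)]
--         )
--
--     return total_sizes
-- ===== SOURCE B (Python) =====
-- def calculate_total_sizes(folder_sizes):
--     # one pass builds a prefix-sum table over ALL prefixes of every key,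
--     # then the totals are read off at the output keys
--     prefix_sum = {}
--     for k, v in folder_sizes.items():
--         for i in range(len(k) + 1):
--             p = k[:i]
--             prefix_sum[p] = prefix_sum.get(p, 0) + v
--     order = ["/"] + [k for k in folder_sizes if k != "/"]
--     return {t: prefix_sum.get(t, 0) for t in order}
-- ===== Notes on version B (the rewrite author's own statement) =====
-- stated objective: faster
-- what changed: Instead of rescanning all items once per total key (A's quadratic double loop), B makes a single pass over the items building a prefix-sum dictionary that adds each size to every prefix of its key, then reads the totals off at the output keys.
import Mathlib
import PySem

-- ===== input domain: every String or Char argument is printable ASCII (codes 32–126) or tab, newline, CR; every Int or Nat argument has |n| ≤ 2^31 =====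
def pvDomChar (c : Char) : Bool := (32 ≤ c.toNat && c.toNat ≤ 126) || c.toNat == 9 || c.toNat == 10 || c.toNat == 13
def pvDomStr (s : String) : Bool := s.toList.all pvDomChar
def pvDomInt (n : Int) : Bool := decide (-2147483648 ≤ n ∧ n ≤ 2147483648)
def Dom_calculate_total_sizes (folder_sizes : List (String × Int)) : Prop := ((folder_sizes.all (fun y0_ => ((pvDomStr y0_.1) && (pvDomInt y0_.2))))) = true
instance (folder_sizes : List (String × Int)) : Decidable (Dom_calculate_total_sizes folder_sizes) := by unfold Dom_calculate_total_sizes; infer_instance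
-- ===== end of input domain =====

-- B replaces A's per-total rescan of all items by a single pass that builds a
-- prefix-sum dictionary (each size added to every prefix of its key) and then
-- reads the totals off at the output keys (faster).

-- ===== PORT A =====
def calculate_total_sizes (folder_sizes : List (String × Int)) : List (String × Int) :=
  let fs : PySem.Dict String Int := PySem.Dict.ofList folder_sizes
  let t0 : PySem.Dict String Int := PySem.Dict.insert PySem.Dict.empty "/" 0
  let t1 : PySem.Dict String Int := fs.keys.foldl (fun d k => d.insert k 0) t0
  let t2 : PySem.Dict String Int := t1.keys.foldl (fun d total =>
      d.insert total (fs.items.foldl (fun acc kv =>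
        if total = PySem.Str.slice kv.1 (some 0) (some (PySem.Str.len total))
        then acc + kv.2 else acc) 0)) t1
  t2.items

-- ===== PORT B =====
def calculate_total_sizes_alt (folder_sizes : List (String × Int)) : List (String × Int) :=
  let fs : PySem.Dict String Int := PySem.Dict.ofList folder_sizes
  let ps : PySem.Dict String Int := fs.items.foldl (fun d kv =>
      (PySem.List.pyRange 0 (PySem.Str.len kv.1 + 1) 1).foldl (fun d i =>
        let p := PySem.Str.slice kv.1 none (some i)
        d.insert p (d.getD p 0 + kv.2)) d) PySem.Dict.empty
  let order : List String := "/" :: fs.keys.filter (fun k => !(k == "/"))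
  (order.foldl (fun d t => d.insert t (ps.getD t 0)) PySem.Dict.empty).items

-- ===== PRECONDITION & SPEC =====
def Spec_calculate_total_sizes (folder_sizes : List (String × Int)) (out : List (String × Int)) : Prop := out = calculate_total_sizes_alt folder_sizes
instance (folder_sizes : List (String × Int)) (out : List (String × Int)) : Decidable (Spec_calculate_total_sizes folder_sizes out) := by unfold Spec_calculate_total_sizes; infer_instance

-- ===== CLAIM (what is proved, stated in full; the proofs are below) =====
def Claim_equal_calculate_total_sizes : Prop := ∀ (folder_sizes : List (String × Int)), Dom_calculate_total_sizes folder_sizes → Spec_calculate_total_sizes folder_sizes (calculate_total_sizes folder_sizes)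

-- ===== LEMMAS AND PROOFS =====

/-- Inserting into a dict updates its key list like a Python set `add`. -/
lemma pv_keys_insert (d : PySem.Dict String Int) (a : String) (v : Int) :
    (d.insert a v).keys = PySem.Set.add d.keys a := by
  rw [PySem.Set.add_eq_ite]
  by_cases h : a ∈ d.keys
  · rw [if_pos h, PySem.Dict.keys_insert_of_contains d v
      (by rw [PySem.Dict.contains_eq_decide_mem_keys]; exact decide_eq_true h)]
  · rw [if_neg h, PySem.Dict.keys_insert_of_not_contains d v
      (by rw [PySem.Dict.contains_eq_decide_mem_keys]; exact decide_eq_false h)]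

/-- A fold inserting `g k` at every key of `l` updates the key list like `Set.update`. -/
lemma pv_keys_insfun (g : String → Int) (l : List String) (d : PySem.Dict String Int) :
    (l.foldl (fun d k => d.insert k (g k)) d).keys = PySem.Set.update d.keys l := by
  induction l generalizing d with
  | nil => rw [List.foldl_nil, PySem.Set.update_nil]
  | cons a l ih => rw [List.foldl_cons, ih, pv_keys_insert, PySem.Set.update_cons]

/-- A fold inserting `g k` at every key of `l` sets `getD · 0` to `g x` for `x ∈ l`. -/
lemma pv_getD_insfun (g : String → Int) (l : List String) (d : PySem.Dict String Int) (x : String) :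
    (l.foldl (fun d k => d.insert k (g k)) d).getD x 0
      = if x ∈ l then g x else d.getD x 0 := by
  induction l generalizing d with
  | nil => simp
  | cons a l ih =>
      simp only [List.foldl_cons]
      rw [ih]
      by_cases hx : x ∈ l <;> by_cases hxa : x = a <;>
        simp [hx, hxa, PySem.Dict.getD_insert]

/-- B's inner loop over the prefixes of one key: the value at `x` grows by `v`
times the number of indices whose slice equals `x`. -/
lemma pv_ps_inner (k : String) (v : Int) (js : List Int) (d : PySem.Dict String Int) (x : String) :
    (js.foldl (fun d i =>
        let p := PySem.Str.slice k none (some i)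
        d.insert p (d.getD p 0 + v)) d).getD x 0
      = d.getD x 0 + v * (js.countP (fun i => decide (PySem.Str.slice k none (some i) = x)) : Int) := by
  induction js generalizing d with
  | nil => simp
  | cons i js ih =>
      simp only [List.foldl_cons]
      rw [ih, List.countP_cons, PySem.Dict.getD_insert]
      by_cases hx : x = PySem.Str.slice k none (some i)
      · subst hx
        have h1 : (decide (PySem.Str.slice k none (some i)
            = PySem.Str.slice k none (some i))) = true := by simp
        rw [if_pos rfl, h1, if_pos rfl]
        push_cast
        ring
      · have h2 : (decide (PySem.Str.slice k none (some i) = x)) = false :=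
          decide_eq_false (fun h => hx h.symm)
        rw [if_neg hx, h2, if_neg Bool.false_ne_true]
        push_cast
        ring

/-- B's outer loop: the prefix-sum dictionary's value at `x` is the sum over the
items of the size times the number of prefix indices hitting `x`. -/
lemma pv_ps_outer (items : List (String × Int)) (d : PySem.Dict String Int) (x : String) :
    (items.foldl (fun d kv =>
        (PySem.List.pyRange 0 (PySem.Str.len kv.1 + 1) 1).foldl (fun d i =>
          let p := PySem.Str.slice kv.1 none (some i)
          d.insert p (d.getD p 0 + kv.2)) d) d).getD x 0
      = d.getD x 0 + (items.map (fun kv =>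
          kv.2 * ((PySem.List.pyRange 0 (PySem.Str.len kv.1 + 1) 1).countP
            (fun i => decide (PySem.Str.slice kv.1 none (some i) = x)) : Int))).sum := by
  induction items generalizing d with
  | nil => simp
  | cons kv items ih =>
      simp only [List.foldl_cons, List.map_cons, List.sum_cons]
      rw [ih, pv_ps_inner]
      ring

/-- Exactly one prefix length of `k` yields `x`, namely when `x` is the `len x`-slice of `k`. -/
lemma pv_countP_prefix (k x : String) :
    ((PySem.List.pyRange 0 (PySem.Str.len k + 1) 1).countP
        (fun i => decide (PySem.Str.slice k none (some i) = x)))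
      = if x = PySem.Str.slice k (some 0) (some (PySem.Str.len x)) then 1 else 0 := by
  have hlen : PySem.Str.len k + 1 = ((k.toList.length + 1 : Nat) : Int) := by
    rw [PySem.Str.len_eq]; push_cast; ring
  have hsl : ∀ j : Nat, (PySem.Str.slice k none (some (j : Int)) = x)
      ↔ (k.toList.take j = x.toList) := by
    intro j
    rw [String.ext_iff, PySem.Str.toList_slice, PySem.Chars.slice_eq_listSlice,
      PySem.List.slice_to_natCast]
  have hrhs : (x = PySem.Str.slice k (some 0) (some (PySem.Str.len x)))
      ↔ (x.toList = k.toList.take x.toList.length) := by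
    rw [String.ext_iff, PySem.Str.toList_slice, PySem.Chars.slice_eq_listSlice,
      PySem.Str.len_eq, PySem.List.slice_zero_start, PySem.List.slice_to_natCast]
  rw [hlen, PySem.List.pyRange_zero_natCast, List.countP_map]
  by_cases hpre : x.toList = k.toList.take x.toList.length
  · have hle : x.toList.length ≤ k.toList.length := by
      have := congrArg List.length hpre
      rw [List.length_take] at this
      omega
    rw [if_pos (hrhs.mpr hpre)]
    have hcongr : ∀ j ∈ List.range (k.toList.length + 1),
        ((fun i => decide (PySem.Str.slice k none (some i) = x)) ∘ (fun j : Nat => (j : Int))) j = true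
        ↔ (j == x.toList.length) = true := by
      intro j hj
      rw [List.mem_range] at hj
      simp only [Function.comp_apply, decide_eq_true_eq, beq_iff_eq, hsl j]
      constructor
      · intro htake
        have := congrArg List.length htake
        rw [List.length_take] at this
        omega
      · intro hj'; subst hj'; exact hpre.symm
    rw [List.countP_congr hcongr]
    have : (List.range (k.toList.length + 1)).countP (fun j => j == x.toList.length)
        = (List.range (k.toList.length + 1)).count x.toList.length := rfl
    rw [this, List.count_eq_one_of_mem List.nodup_range (by rw [List.mem_range]; omega)]
  · rw [if_neg (fun h => hpre (hrhs.mp h))]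
    rw [List.countP_eq_zero]
    intro j hj
    rw [List.mem_range] at hj
    simp only [Function.comp_apply, decide_eq_true_eq, hsl j]
    intro htake
    have := congrArg List.length htake
    rw [List.length_take] at this
    have hj2 : j = x.toList.length := by omega
    subst hj2
    exact hpre htake.symm

/-- Turning a sum of `if P kv then kv.2 else 0` into a filtered sum. -/
lemma pv_sum_ite (items : List (String × Int)) (P : String × Int → Prop) [DecidablePred P] :
    (items.map (fun kv => if P kv then kv.2 else 0)).sum
      = ((items.filter (fun kv => decide (P kv))).map (fun kv => kv.2)).sum := by
  induction items with
  | nil => simp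
  | cons kv items ih =>
      by_cases h : P kv <;> simp [h, ih]

-- ===== VERDICT (by name: the statement is the Claim_ definition above) =====
theorem calculate_total_sizes_spec : Claim_equal_calculate_total_sizes := by
  intro folder_sizes _
  show calculate_total_sizes folder_sizes = calculate_total_sizes_alt folder_sizes
  simp only [calculate_total_sizes, calculate_total_sizes_alt]
  set fs : PySem.Dict String Int := PySem.Dict.ofList folder_sizes with hfs
  set t0 : PySem.Dict String Int := PySem.Dict.insert PySem.Dict.empty "/" 0 with ht0
  set t1 : PySem.Dict String Int := fs.keys.foldl (fun d k => d.insert k 0) t0 with ht1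
  set ps : PySem.Dict String Int := fs.items.foldl (fun d kv =>
      (PySem.List.pyRange 0 (PySem.Str.len kv.1 + 1) 1).foldl (fun d i =>
        let p := PySem.Str.slice kv.1 none (some i)
        d.insert p (d.getD p 0 + kv.2)) d) PySem.Dict.empty with hps
  set order : List String := "/" :: fs.keys.filter (fun k => !(k == "/")) with horder
  have hndfs : fs.keys.Nodup := PySem.Dict.nodup_keys_ofList folder_sizes
  have ht0k : t0.keys = ["/"] := by
    rw [ht0, PySem.Dict.keys_insert_of_not_contains _ _ (PySem.Dict.contains_empty _)]
    rw [PySem.Dict.keys_empty, List.nil_append]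
  -- the key list of A's totals dict is B's `order`
  have ht1k : t1.keys = order := by
    rw [ht1, pv_keys_insfun (fun _ => 0), ht0k,
      PySem.Set.update_eq_append_filter, PySem.Set.ofList_eq_self_of_nodup fs.keys hndfs, horder]
    simp only [List.singleton_append, List.cons.injEq, true_and]
    apply List.filter_congr
    intro k _
    have hc : PySem.Set.contains ["/"] k = (k == "/") := by
      by_cases hk : k = "/"
      · subst hk; simp
      · simp [hk]
    rw [hc]
  have hndt1 : t1.keys.Nodup := by
    rw [ht1k, horder]
    refine List.Nodup.cons ?_ (hndfs.filter _)
    intro hmem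
    have := (List.mem_filter.mp hmem).2
    simp at this
  -- zero initialisation
  have h1 : ∀ x, t1.getD x 0 = 0 := by
    intro x
    rw [ht1, pv_getD_insfun (fun _ => 0)]
    split
    · rfl
    · rw [ht0, PySem.Dict.getD_insert]
      split <;> simp [PySem.Dict.getD_empty]
  -- A's second loop
  set f : String → Int := fun total => fs.items.foldl (fun acc kv =>
      if total = PySem.Str.slice kv.1 (some 0) (some (PySem.Str.len total))
      then acc + kv.2 else acc) 0 with hf
  set t2 : PySem.Dict String Int := t1.keys.foldl (fun d total => d.insert total (f total)) t1 with ht2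
  have ht2k : t2.keys = t1.keys := by
    rw [ht2, pv_keys_insfun f, PySem.Set.update_eq_append_filter]
    have : ((PySem.Set.ofList t1.keys).filter (fun y => !(PySem.Set.contains t1.keys y))) = [] := by
      apply List.filter_eq_nil_iff.mpr
      intro y hy
      have hmem : y ∈ t1.keys := (PySem.Set.mem_ofList _ _).mp hy
      have hc : PySem.Set.contains t1.keys y = true := (PySem.Set.contains_iff _ _).mpr hmem
      rw [hc]
      simp
    rw [this, List.append_nil]
  have hndt2 : t2.keys.Nodup := by rw [ht2k]; exact hndt1
  have hAval : ∀ x ∈ t1.keys, t2.getD x 0 = f x := by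
    intro x hx
    rw [ht2, pv_getD_insfun]
    rw [if_pos hx]
  -- B's output dict
  set bd : PySem.Dict String Int :=
    order.foldl (fun d t => d.insert t (ps.getD t 0)) PySem.Dict.empty with hbd
  have hbdk : bd.keys = order := by
    rw [hbd, pv_keys_insfun (fun t => ps.getD t 0), PySem.Dict.keys_empty,
      PySem.Set.update_nil_left,
      PySem.Set.ofList_eq_self_of_nodup order (by rw [← ht1k]; exact hndt1)]
  have hndbd : bd.keys.Nodup := by rw [hbdk, ← ht1k]; exact hndt1
  have hBval : ∀ x ∈ order, bd.getD x 0 = ps.getD x 0 := by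
    intro x hx
    rw [hbd, pv_getD_insfun, if_pos hx]
  -- compare the two item lists
  rw [PySem.Dict.items_eq_map_keys t2 hndt2 0, PySem.Dict.items_eq_map_keys bd hndbd 0,
    ht2k, hbdk, ht1k]
  refine List.map_congr_left (fun t ht => ?_)
  rw [hAval t (by rwa [ht1k]), hBval t ht]
  -- both values are the filtered sum of sizes over keys with prefix t
  simp only [Prod.mk.injEq, true_and, hf]
  rw [PySem.List.foldl_ite_eq_foldl_filter
        (p := fun kv : String × Int => t = PySem.Str.slice kv.1 (some 0) (some (PySem.Str.len t)))
        (f := fun acc kv => acc + kv.2),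
      PySem.List.foldl_add (g := fun kv : String × Int => kv.2)]
  rw [hps, pv_ps_outer, PySem.Dict.getD_empty]
  have : ∀ kv : String × Int,
      kv.2 * (((PySem.List.pyRange 0 (PySem.Str.len kv.1 + 1) 1).countP
          (fun i => decide (PySem.Str.slice kv.1 none (some i) = t))) : Int)
      = if t = PySem.Str.slice kv.1 (some 0) (some (PySem.Str.len t)) then kv.2 else 0 := by
    intro kv
    rw [pv_countP_prefix kv.1 t]
    split <;> simp
  simp only [this]
  rw [pv_sum_ite]
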